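-- pv_equiv track=rewrite | github.com/nikcache/cryptopals_set_1 | convert.py | allKeysr
-- ===== SOURCE A (Python) =====
-- def allKeysr(n, c, new_lst, old_lst, hex_lst):
--     if c == 0:
--         return old_lst
--     else:
--         for i in range(len(old_lst)):
--             for j in range(len(hex_lst)):
--                 new_lst.append(old_lst[i] + hex_lst[j])
--         return allKeysr(n, c-1, [], new_lst, hex_lst)
-- ===== SOURCE B (Python) =====
-- def allKeysr(n, c, new_lst, old_lst, hex_lst):
--     # Closed-form enumeration: every result key is a seed (an element of
--     # new_lst, or an old+hex pair) followed by a suffix word; the t-th suffix is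
--     # decoded directly from the counter t written in base len(hex_lst) with
--     # c-1 digits.
--     if c == 0:
--         return old_lst
--     b = len(hex_lst)
--     seeds = new_lst + [p + h for p in old_lst for h in hex_lst]
--     if not seeds:
--         return []
--     words = []
--     for t in range(b ** (c - 1)):
--         s = ""
--         x = t
--         for _ in range(c - 1):
--             s = hex_lst[x % b] + s
--             x //= b
--         words.append(s)
--     return [g + w for g in seeds for w in words]
-- ===== Notes on version B (the rewrite author's own statement) =====
-- stated objective: alternative
-- what changed: A's generation-by-generation tail recursion over c is replaced by a closed-form enumeration: a word table is built by decoding each counter t below len(hex_lst)**(c-1) as a base-len(hex_lst) numeral, then one comprehension pairs every seed with every word; Pre_ excludes only c < 0, on which A raises RecursionError (and B also raises). The equivalence is about return values only: A mutates the caller's new_lst, B does not.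
import Mathlib
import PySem

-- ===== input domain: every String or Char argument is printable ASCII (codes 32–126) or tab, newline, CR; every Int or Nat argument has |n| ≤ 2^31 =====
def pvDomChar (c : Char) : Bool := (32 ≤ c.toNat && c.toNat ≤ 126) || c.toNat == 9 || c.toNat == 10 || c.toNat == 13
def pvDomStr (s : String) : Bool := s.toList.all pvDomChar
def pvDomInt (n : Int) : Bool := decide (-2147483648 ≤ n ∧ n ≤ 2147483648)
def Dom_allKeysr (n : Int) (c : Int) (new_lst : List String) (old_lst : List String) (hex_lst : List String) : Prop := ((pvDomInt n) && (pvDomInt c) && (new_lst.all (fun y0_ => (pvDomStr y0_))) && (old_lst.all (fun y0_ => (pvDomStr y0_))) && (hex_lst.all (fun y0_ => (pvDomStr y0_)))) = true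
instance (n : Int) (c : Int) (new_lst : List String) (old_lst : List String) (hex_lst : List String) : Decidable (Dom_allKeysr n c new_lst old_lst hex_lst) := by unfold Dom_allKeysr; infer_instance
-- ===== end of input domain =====

-- B replaces A's generation-by-generation tail recursion over c by a closed-form
-- enumeration (each key = seed + the word spelled by a counter in base
-- len(hex_lst)); 'alternative' objective. A mutates the caller's new_lst, B does
-- not: the equivalence proved here is about the RETURN value only.

-- ===== PORT A =====
-- recursion counter: Python recurses on c-1 until c == 0; we recurse on c.toNat
-- (for c < 0 Python raises RecursionError — excluded by Pre_).
def allKeysrAux (new_lst : List String) (old_lst : List String) (hex_lst : List String) : Nat → List String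
  | 0 => old_lst
  | k + 1 =>
      allKeysrAux []
        ((PySem.List.pyRange 0 (PySem.List.len old_lst) 1).foldl (fun acc i =>
          (PySem.List.pyRange 0 (PySem.List.len hex_lst) 1).foldl (fun acc2 j =>
            acc2 ++ [PySem.List.pyGetD old_lst i "" ++ PySem.List.pyGetD hex_lst j ""]) acc) new_lst)
        hex_lst k

def allKeysr (n : Int) (c : Int) (new_lst : List String) (old_lst : List String) (hex_lst : List String) : List String :=
  allKeysrAux new_lst old_lst hex_lst c.toNat

-- ===== PORT B =====
-- Source B, step for step: seeds = new_lst + [p+h for p in old_lst for h in hex_lst];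
-- if there are no seeds the result is [] at once; otherwise the words list is
-- built by decoding each counter t below b ** (c-1) (exact
-- for c ≥ 1, the Pre_ domain off the c == 0 branch): c-1 digits extracted least
-- significant first by pvAltStep (s = hex_lst[x % b] + s; x //= b); finally the
-- comprehension [g + w for g in seeds for w in words].
def pvAltStep (hex_lst : List String) (sx : String × Int) : String × Int :=
  (PySem.List.pyGetD hex_lst (PySem.Int.mod sx.2 (PySem.List.len hex_lst)) "" ++ sx.1,
   PySem.Int.floordiv sx.2 (PySem.List.len hex_lst))

def allKeysr_alt (n : Int) (c : Int) (new_lst : List String) (old_lst : List String) (hex_lst : List String) : List String :=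
  if c = 0 then old_lst
  else
    let seeds := new_lst ++ old_lst.flatMap (fun p => hex_lst.map (fun h => p ++ h))
    if seeds = [] then []
    else
    let words := (PySem.List.pyRange 0 ((hex_lst.length ^ (c - 1).toNat : Nat) : Int) 1).foldl
      (fun ws t => ws ++ [((PySem.List.pyRange 0 (c - 1) 1).foldl
        (fun sx _ => pvAltStep hex_lst sx) ("", t)).1]) []
    seeds.flatMap (fun g => words.map (fun w => g ++ w))

-- ===== PRECONDITION & SPEC =====
-- Pre_ excludes exactly c < 0, on which A recurses on c-1 without reaching 0 and
-- raises RecursionError (B raises there too).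
def Pre_allKeysr (n : Int) (c : Int) (new_lst : List String) (old_lst : List String) (hex_lst : List String) : Prop :=
  0 ≤ c
instance (n : Int) (c : Int) (new_lst : List String) (old_lst : List String) (hex_lst : List String) : Decidable (Pre_allKeysr n c new_lst old_lst hex_lst) := by unfold Pre_allKeysr; infer_instance

def pvWitness_allKeysr : Int × Int × List String × List String × List String :=
  (0, 2, ["x"], ["a", "b"], ["0", "1"])

def Spec_allKeysr (n : Int) (c : Int) (new_lst : List String) (old_lst : List String) (hex_lst : List String) (out : List String) : Prop := out = allKeysr_alt n c new_lst old_lst hex_lst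
instance (n : Int) (c : Int) (new_lst : List String) (old_lst : List String) (hex_lst : List String) (out : List String) : Decidable (Spec_allKeysr n c new_lst old_lst hex_lst out) := by unfold Spec_allKeysr; infer_instance

-- ===== CLAIM (what is proved, stated in full; the proofs are below) =====
def Claim_equal_allKeysr : Prop := ∀ (n : Int) (c : Int) (new_lst : List String) (old_lst : List String) (hex_lst : List String), Dom_allKeysr n c new_lst old_lst hex_lst → Pre_allKeysr n c new_lst old_lst hex_lst → Spec_allKeysr n c new_lst old_lst hex_lst (allKeysr n c new_lst old_lst hex_lst)

-- ===== LEMMAS AND PROOFS =====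

-- the products of one round, in iteration order
def pvProd (hex_lst old_lst : List String) : List String :=
  old_lst.flatMap (fun p => hex_lst.map (fun h => p ++ h))

-- all words of length k over hex_lst, in the order the generations produce them
-- (last letter varies fastest)
def pvW (hex_lst : List String) : Nat → List String
  | 0 => [""]
  | k + 1 => (pvW hex_lst k).flatMap (fun w => hex_lst.map (fun h => w ++ h))

-- the word spelled by t in base hex_lst.length with m digits, most significant first
def pvWord (hex_lst : List String) : Nat → Nat → String
  | 0, _ => ""
  | m + 1, t =>
      pvWord hex_lst m (t / hex_lst.length) ++
        PySem.List.pyGetD hex_lst ((t % hex_lst.length : Nat) : Int) ""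

-- A's nested index loops over range(len(old))×range(len(hex)) produce new ++ pvProd
lemma allKeysr_inner_eq (old_lst hex_lst new_lst : List String) :
    (PySem.List.pyRange 0 (PySem.List.len old_lst) 1).foldl (fun acc i =>
      (PySem.List.pyRange 0 (PySem.List.len hex_lst) 1).foldl (fun acc2 j =>
        acc2 ++ [PySem.List.pyGetD old_lst i "" ++ PySem.List.pyGetD hex_lst j ""]) acc) new_lst
    = new_lst ++ pvProd hex_lst old_lst := by
  rw [PySem.List.foldl_pyRange_zero_pyGetD old_lst ""
        (fun acc p => (PySem.List.pyRange 0 (PySem.List.len hex_lst) 1).foldl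
          (fun acc2 j => acc2 ++ [p ++ PySem.List.pyGetD hex_lst j ""]) acc) new_lst]
  have h : ∀ (acc : List String) (p : String), p ∈ old_lst →
      (PySem.List.pyRange 0 (PySem.List.len hex_lst) 1).foldl
        (fun acc2 j => acc2 ++ [p ++ PySem.List.pyGetD hex_lst j ""]) acc
      = acc ++ hex_lst.map (fun h => p ++ h) := by
    intro acc p _
    rw [PySem.List.foldl_pyRange_zero_pyGetD hex_lst "" (fun acc2 h => acc2 ++ [p ++ h]) acc,
        PySem.List.foldl_append_singleton_eq_map]
  calc old_lst.foldl (fun acc p => (PySem.List.pyRange 0 (PySem.List.len hex_lst) 1).foldl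
          (fun acc2 j => acc2 ++ [p ++ PySem.List.pyGetD hex_lst j ""]) acc) new_lst
      = old_lst.foldl (fun acc p => acc ++ hex_lst.map (fun h => p ++ h)) new_lst := by
        apply PySem.List.foldl_congr_mem; intro acc p hp; exact h acc p hp
    _ = new_lst ++ pvProd hex_lst old_lst := PySem.List.foldl_append_eq_flatMap _ _ _

-- the words of length k+1 are also: first letter outermost
lemma pvW_front (hex_lst : List String) (k : Nat) :
    pvW hex_lst (k + 1) = hex_lst.flatMap (fun h => (pvW hex_lst k).map (fun w => h ++ w)) := by
  induction k with
  | zero => simp [pvW]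
  | succ k ih =>
      calc pvW hex_lst (k + 2)
          = (pvW hex_lst (k + 1)).flatMap (fun w => hex_lst.map (fun h => w ++ h)) := rfl
        _ = (hex_lst.flatMap (fun h => (pvW hex_lst k).map (fun w => h ++ w))).flatMap
              (fun w => hex_lst.map (fun h => w ++ h)) := by rw [ih]
        _ = hex_lst.flatMap (fun h => (pvW hex_lst (k + 1)).map (fun w => h ++ w)) := by
              simp only [List.flatMap_assoc, List.flatMap_map, List.map_flatMap, pvW,
                List.map_map]
              refine List.flatMap_congr fun h _ => ?_
              refine List.flatMap_congr fun w _ => ?_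
              refine List.map_congr_left fun x _ => ?_
              simp [String.append_assoc]

-- A's recursion from a seed list: every element is extended by every word
lemma allKeysrAux_flat (hex_lst : List String) (k : Nat) :
    ∀ g : List String,
      allKeysrAux [] g hex_lst k = g.flatMap (fun x => (pvW hex_lst k).map (fun w => x ++ w)) := by
  induction k with
  | zero => intro g; simp [allKeysrAux, pvW]
  | succ k ih =>
      intro g
      rw [allKeysrAux, allKeysr_inner_eq, List.nil_append, ih]
      unfold pvProd
      rw [pvW_front]
      simp only [List.flatMap_assoc, List.flatMap_map, List.map_flatMap, List.map_map]
      refine List.flatMap_congr fun x _ => ?_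
      refine List.flatMap_congr fun h _ => ?_
      refine List.map_congr_left fun w _ => ?_
      simp [String.append_assoc]

-- a fold that ignores the elements is an iterate of its step
lemma foldl_const_iterate {α β : Type} (l : List α) (f : β → β) (init : β) :
    l.foldl (fun acc _ => f acc) init = f^[l.length] init := by
  induction l generalizing init with
  | nil => rfl
  | cons a l ih => simp [List.foldl_cons, ih, Function.iterate_succ_apply]

-- the digit-stripping loop computes pvWord
lemma iterate_word (hex_lst : List String) (m : Nat) :
    ∀ (s : String) (x : Nat),
      (pvAltStep hex_lst)^[m] (s, (x : Int))
        = (pvWord hex_lst m x ++ s, ((x / hex_lst.length ^ m : Nat) : Int)) := by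
  induction m with
  | zero => intro s x; simp [pvWord]
  | succ m ih =>
      intro s x
      have hstep : pvAltStep hex_lst (s, (x : Int))
          = (PySem.List.pyGetD hex_lst ((x % hex_lst.length : Nat) : Int) "" ++ s,
             ((x / hex_lst.length : Nat) : Int)) := by
        simp [pvAltStep]
      rw [Function.iterate_succ_apply, hstep,
        ih (PySem.List.pyGetD hex_lst ((x % hex_lst.length : Nat) : Int) "" ++ s)
          (x / hex_lst.length),
        Prod.mk.injEq]
      constructor
      · rw [show pvWord hex_lst (m + 1) x
            = pvWord hex_lst m (x / hex_lst.length) ++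
                PySem.List.pyGetD hex_lst ((x % hex_lst.length : Nat) : Int) "" from rfl,
          String.append_assoc]
      · rw [Nat.div_div_eq_div_mul, ← pow_succ']

lemma range_mul_flat (n b : Nat) :
    List.range (n * b) = (List.range n).flatMap (fun q => (List.range b).map (fun u => q * b + u)) := by
  induction n with
  | zero => simp
  | succ n ih =>
      rw [Nat.succ_mul, List.range_add, ih, List.range_succ]
      simp

-- decoding every counter below b^m yields exactly the words of length m, in order
lemma map_range_pvWord (hex_lst : List String) (m : Nat) :
    (List.range (hex_lst.length ^ m)).map (pvWord hex_lst m) = pvW hex_lst m := by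
  induction m with
  | zero => simp [pvWord, pvW]
  | succ m ih =>
      rw [pow_succ, range_mul_flat, List.map_flatMap]
      calc (List.range (hex_lst.length ^ m)).flatMap
              (fun q => ((List.range hex_lst.length).map (fun u => q * hex_lst.length + u)).map
                (pvWord hex_lst (m + 1)))
          = (List.range (hex_lst.length ^ m)).flatMap
              (fun q => hex_lst.map (fun h => pvWord hex_lst m q ++ h)) := by
            refine List.flatMap_congr fun q _ => ?_
            rw [List.map_map]
            have step : ∀ u ∈ List.range hex_lst.length,
                (pvWord hex_lst (m + 1) ∘ fun u => q * hex_lst.length + u) u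
                  = (fun h => pvWord hex_lst m q ++ h) (hex_lst.getD u "") := by
              intro u hu
              have hub : u < hex_lst.length := List.mem_range.mp hu
              have hb : 0 < hex_lst.length := by omega
              have hdiv : (q * hex_lst.length + u) / hex_lst.length = q := by
                rw [Nat.mul_comm, Nat.mul_add_div hb, Nat.div_eq_of_lt hub]; omega
              have hmod : (q * hex_lst.length + u) % hex_lst.length = u := by
                rw [Nat.mul_comm, Nat.mul_add_mod, Nat.mod_eq_of_lt hub]
              simp only [Function.comp, pvWord, hdiv, hmod, PySem.List.pyGetD_natCast]
            rw [List.map_congr_left step]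
            apply List.ext_getElem
            · simp
            · intro i h1 h2
              have hi : i < hex_lst.length := by simpa using h2
              simp [List.getD, List.getElem?_eq_getElem hi]
        _ = pvW hex_lst (m + 1) := by
            conv_rhs => rw [show pvW hex_lst (m + 1)
              = (pvW hex_lst m).flatMap (fun w => hex_lst.map (fun h => w ++ h)) from rfl,
              ← ih, List.flatMap_map]

-- ===== VERDICT (by name: the statement is the Claim_ definition above) =====
theorem allKeysr_spec : Claim_equal_allKeysr := by
  intro n c new_lst old_lst hex_lst _ hPre
  unfold Spec_allKeysr allKeysr allKeysr_alt
  by_cases hc0 : c = 0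
  · simp [hc0, allKeysrAux]
  · have hc1 : 1 ≤ c := by unfold Pre_allKeysr at hPre; omega
    have hct : c.toNat = (c - 1).toNat + 1 := by omega
    rw [if_neg hc0, hct, allKeysrAux, allKeysr_inner_eq,
      allKeysrAux_flat hex_lst ((c - 1).toNat) (new_lst ++ pvProd hex_lst old_lst)]
    -- the words list decodes to exactly the words of length c-1, in order
    have hwords : (PySem.List.pyRange 0 ((hex_lst.length ^ (c - 1).toNat : Nat) : Int) 1).foldl
        (fun ws t => ws ++ [((PySem.List.pyRange 0 (c - 1) 1).foldl
          (fun sx _ => pvAltStep hex_lst sx) ("", t)).1]) []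
        = pvW hex_lst ((c - 1).toNat) := by
      rw [PySem.List.foldl_append_singleton_eq_map, List.nil_append,
        PySem.List.pyRange_zero_natCast, List.map_map,
        ← map_range_pvWord hex_lst ((c - 1).toNat)]
      refine List.map_congr_left fun k _ => ?_
      simp only [Function.comp]
      rw [foldl_const_iterate, PySem.List.length_pyRange_one,
        show ((c : Int) - 1 - 0).toNat = (c - 1).toNat by omega,
        iterate_word hex_lst ((c - 1).toNat) "" k]
      simp
    by_cases hs : new_lst ++ pvProd hex_lst old_lst = []
    · simp only [pvProd] at hs ⊢
      rw [hs]
      simp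
    · simp only [pvProd] at hs ⊢
      rw [if_neg hs]
      simp only [hwords]
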